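-- pv_equiv track=rewrite | github.com/susantedit/selftrainedjarvis | app/services/brain_service.py | _parse_single
-- ===== SOURCE A (Python) =====
-- from typing import List, Optional, Tuple, Literal
--
-- def _parse_single(text: str, valid_options: List[str], default: str) -> str:
--
--     if not text:
--         return default
--
--     text = text.strip().lower()
--
--     for opt in valid_options:
--         if text == opt:
--             return opt
--
--     for opt in valid_options:
--         if opt in text:
--             return opt
--     return default
-- ===== SOURCE B (Python) =====
-- def _parse_single(text, valid_options, default):
--     if not text:
--         return default
--     text = text.strip().lower()
--     candidate = None
--     for opt in valid_options:
--         if text == opt: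
--             return opt
--         if candidate is None and opt in text:
--             candidate = opt
--     return candidate if candidate is not None else default
-- ===== Notes on version B (the rewrite author's own statement) =====
-- stated objective: simpler
-- what changed: Replaced A's two sequential scans of valid_options (exact pass, then substring pass) by one single pass that returns on an exact match and records the first substring match as a deferred candidate, returned after the loop.
import Mathlib
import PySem

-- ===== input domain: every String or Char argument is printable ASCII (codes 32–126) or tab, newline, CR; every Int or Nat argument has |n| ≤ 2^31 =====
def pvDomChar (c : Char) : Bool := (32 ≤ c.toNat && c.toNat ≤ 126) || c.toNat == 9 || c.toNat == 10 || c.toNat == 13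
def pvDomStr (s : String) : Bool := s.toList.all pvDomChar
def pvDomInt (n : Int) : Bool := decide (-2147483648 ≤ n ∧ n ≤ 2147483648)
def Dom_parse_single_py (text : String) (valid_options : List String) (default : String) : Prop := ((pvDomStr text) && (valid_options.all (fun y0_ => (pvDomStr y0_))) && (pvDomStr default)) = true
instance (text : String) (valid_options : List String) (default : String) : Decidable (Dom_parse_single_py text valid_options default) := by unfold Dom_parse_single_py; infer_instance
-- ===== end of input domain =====

-- B folds A's two sequential scans (exact pass, then substring pass) into one pass
-- that returns on an exact match and defers the first substring match; simpler, same cost.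


-- ===== PORT A =====
-- first loop of A: first opt with text == opt
def pvFindExact (t : String) : List String → Option String
  | [] => none
  | o :: rest => if t == o then some o else pvFindExact t rest

-- second loop of A: first opt with opt in text
def pvFindSub (t : String) : List String → Option String
  | [] => none
  | o :: rest => if PySem.Str.isIn o t then some o else pvFindSub t rest

def parse_single_py (text : String) (valid_options : List String) (default : String) : String :=
  if text == "" then default
  else
    let t := PySem.Str.lower (PySem.Str.strip text)
    match pvFindExact t valid_options with
    | some o => o
    | none =>
      match pvFindSub t valid_options with
      | some o => o
      | none => default

-- ===== PORT B =====
-- single pass: return on exact match, record first substring match as candidate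
def pvAltLoop (t : String) : List String → Option String → Option String
  | [], cand => cand
  | o :: rest, cand =>
    if t == o then some o
    else pvAltLoop t rest (if cand.isNone && PySem.Str.isIn o t then some o else cand)

def parse_single_py_alt (text : String) (valid_options : List String) (default : String) : String :=
  if text == "" then default
  else
    let t := PySem.Str.lower (PySem.Str.strip text)
    (pvAltLoop t valid_options none).getD default

-- ===== PRECONDITION & SPEC =====
def Spec_parse_single_py (text : String) (valid_options : List String) (default : String) (out : String) : Prop := out = parse_single_py_alt text valid_options default
instance (text : String) (valid_options : List String) (default : String) (out : String) : Decidable (Spec_parse_single_py text valid_options default out) := by unfold Spec_parse_single_py; infer_instance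

-- ===== CLAIM (what is proved, stated in full; the proofs are below) =====
def Claim_equal_parse_single_py : Prop := ∀ (text : String) (valid_options : List String) (default : String), Dom_parse_single_py text valid_options default → Spec_parse_single_py text valid_options default (parse_single_py text valid_options default)

-- ===== LEMMAS AND PROOFS =====
-- B's loop equals: exact hit if any, else the already-stored candidate, else A's substring scan
theorem pvAltLoop_eq (t : String) (opts : List String) (cand : Option String) :
    pvAltLoop t opts cand =
      match pvFindExact t opts with
      | some o => some o
      | none =>
        match cand with
        | some c => some c
        | none => pvFindSub t opts := by
  induction opts generalizing cand with
  | nil => cases cand <;> simp [pvAltLoop, pvFindExact, pvFindSub]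
  | cons o rest ih =>
    simp only [pvAltLoop, pvFindExact, pvFindSub]
    by_cases h : t == o
    · simp [h]
    · simp only [h]
      cases cand with
      | some c => simpa using ih (some c)
      | none =>
        by_cases hs : PySem.Str.isIn o t
        · simp only [hs]
          simpa using ih (some o)
        · simp only [hs]
          simpa using ih none

-- ===== VERDICT (by name: the statement is the Claim_ definition above) =====
theorem parse_single_py_spec : Claim_equal_parse_single_py := by
  intro text valid_options default _
  unfold Spec_parse_single_py parse_single_py parse_single_py_alt
  by_cases h : text == ""
  · simp [h]
  · simp only [h]
    rw [pvAltLoop_eq]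
    cases pvFindExact (PySem.Str.lower (PySem.Str.strip text)) valid_options <;>
      cases hs : pvFindSub (PySem.Str.lower (PySem.Str.strip text)) valid_options <;>
      simp
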